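-- pv_equiv track=rewrite | github.com/pahaul/horizn-analytics | build_prompt.py | extract_signal_pool
-- ===== SOURCE A (Python) =====
-- from collections import defaultdict
--
-- def extract_signal_pool(log: dict) -> dict:
--     """field -> [value, ...], duplicates kept for frequency weighting."""
--     FIELDS = ["shot_size", "camera_angle", "depth_of_field", "lighting",
--               "people_presence", "setting", "composition", "narrative_style"]
--     pool: dict = defaultdict(list)
--     for entry in log.get("vision_analysis", []):
--         for field in FIELDS:
--             val = entry.get(field)
--             if val:
--                 pool[field].append(val)
--     return dict(pool)
-- ===== SOURCE B (Python) =====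
-- def extract_signal_pool(log: dict) -> dict:
--     """field -> [value, ...], duplicates kept for frequency weighting."""
--     FIELDS = ["shot_size", "camera_angle", "depth_of_field", "lighting",
--               "people_presence", "setting", "composition", "narrative_style"]
--     entries = log.get("vision_analysis", [])
--     pairs = [(f, e.get(f)) for e in entries for f in FIELDS if e.get(f)]
--     keys = list(dict.fromkeys(f for f, _ in pairs))
--     return {k: [v for f, v in pairs if f == k] for k in keys}
-- ===== Notes on version B (the rewrite author's own statement) =====
-- stated objective: alternative
-- what changed: Replaces the nested-loop defaultdict accumulation with a flatten-then-group pipeline: one flat comprehension of (field, value) pairs, an ordered key dedup via dict.fromkeys, and a per-key filter comprehension to build the result.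
import Mathlib
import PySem

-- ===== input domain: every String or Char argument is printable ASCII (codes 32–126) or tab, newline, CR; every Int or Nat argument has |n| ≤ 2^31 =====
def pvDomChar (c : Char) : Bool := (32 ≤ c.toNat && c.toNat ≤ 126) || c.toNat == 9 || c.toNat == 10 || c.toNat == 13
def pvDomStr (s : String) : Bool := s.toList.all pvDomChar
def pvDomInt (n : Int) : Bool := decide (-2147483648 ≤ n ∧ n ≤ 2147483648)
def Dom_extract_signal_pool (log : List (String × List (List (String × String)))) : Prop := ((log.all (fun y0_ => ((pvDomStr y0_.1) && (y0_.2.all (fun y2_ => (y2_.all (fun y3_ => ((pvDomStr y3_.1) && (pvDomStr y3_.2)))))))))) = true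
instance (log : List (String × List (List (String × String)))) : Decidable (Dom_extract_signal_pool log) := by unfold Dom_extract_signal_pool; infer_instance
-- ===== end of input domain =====

-- B replaces A's nested-loop defaultdict accumulation by a flatten-then-group pipeline
-- (flat pair list, ordered key dedup, per-key filter); same cost, alternative structure.

-- ===== PORT A =====
def pvFIELDS : List String :=
  ["shot_size", "camera_angle", "depth_of_field", "lighting",
   "people_presence", "setting", "composition", "narrative_style"]

def extract_signal_pool (log : List (String × List (List (String × String)))) : List (String × List String) :=
  let entries := ((PySem.Dict.mk log).get? "vision_analysis").getD []
  (entries.foldl (fun pool entry =>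
      pvFIELDS.foldl (fun pool field =>
        match (PySem.Dict.mk entry).get? field with
        | some val => if val ≠ "" then pool.modify field [] (· ++ [val]) else pool
        | none => pool) pool)
    (PySem.Dict.empty : PySem.Dict String (List String))).items

-- ===== PORT B =====
-- the pairs of one entry: [(f, e.get(f)) for f in FIELDS if e.get(f)]
def pvTruthyPairs (entry : List (String × String)) : List (String × String) :=
  pvFIELDS.filterMap (fun f =>
    match (PySem.Dict.mk entry).get? f with
    | some v => if v ≠ "" then some (f, v) else none
    | none => none)

def extract_signal_pool_alt (log : List (String × List (List (String × String)))) : List (String × List String) :=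
  let entries := ((PySem.Dict.mk log).get? "vision_analysis").getD []
  let pairs := entries.flatMap pvTruthyPairs
  let keys := PySem.List.dedup (pairs.map (·.1))
  keys.map (fun k => (k, (pairs.filter (fun p => p.1 == k)).map (·.2)))

-- ===== PRECONDITION & SPEC =====
def Spec_extract_signal_pool (log : List (String × List (List (String × String)))) (out : List (String × List String)) : Prop := out = extract_signal_pool_alt log
instance (log : List (String × List (List (String × String)))) (out : List (String × List String)) : Decidable (Spec_extract_signal_pool log out) := by unfold Spec_extract_signal_pool; infer_instance

-- ===== CLAIM (what is proved, stated in full; the proofs are below) =====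
def Claim_equal_extract_signal_pool : Prop := ∀ (log : List (String × List (List (String × String)))), Dom_extract_signal_pool log → Spec_extract_signal_pool log (extract_signal_pool log)

-- ===== LEMMAS AND PROOFS =====

-- A's inner loop over FIELDS is the grouping step folded over the entry's truthy pairs.
theorem pv_inner_fold (l : List String) (entry : List (String × String))
    (pool : PySem.Dict String (List String)) :
    l.foldl (fun pool field =>
        match (PySem.Dict.mk entry).get? field with
        | some val => if val ≠ "" then pool.modify field [] (· ++ [val]) else pool
        | none => pool) pool
      = (l.filterMap (fun f =>
          match (PySem.Dict.mk entry).get? f with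
          | some v => if v ≠ "" then some (f, v) else none
          | none => none)).foldl (fun d p => d.modify p.1 [] (· ++ [p.2])) pool := by
  induction l generalizing pool with
  | nil => rfl
  | cons f t ih =>
    simp only [List.foldl_cons, List.filterMap_cons]
    cases h : (PySem.Dict.mk entry).get? f with
    | none => simpa using ih _
    | some v =>
      by_cases hv : v = ""
      · simp [hv]
        simpa using ih _
      · simp [hv]
        simpa using ih _

-- A's double loop is the grouping step folded over the flattened pair list.
theorem pv_flatten (entries : List (List (String × String)))
    (pool : PySem.Dict String (List String)) :
    entries.foldl (fun pool entry =>
        pvFIELDS.foldl (fun pool field =>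
          match (PySem.Dict.mk entry).get? field with
          | some val => if val ≠ "" then pool.modify field [] (· ++ [val]) else pool
          | none => pool) pool) pool
      = (entries.flatMap pvTruthyPairs).foldl (fun d p => d.modify p.1 [] (· ++ [p.2])) pool := by
  induction entries generalizing pool with
  | nil => rfl
  | cons e t ih =>
    simp only [List.foldl_cons, List.flatMap_cons, List.foldl_append]
    rw [pv_inner_fold]
    exact ih _

-- The grouping fold over any pair list is B's dedup-keys-then-filter construction.
theorem pv_group (P : List (String × String)) :
    ((P.foldl (fun d p => d.modify p.1 [] (· ++ [p.2]))
        (PySem.Dict.empty : PySem.Dict String (List String))).items)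
      = (PySem.List.dedup (P.map (·.1))).map
          (fun k => (k, (P.filter (fun p => p.1 == k)).map (·.2))) := by
  have hnd : ((P.foldl (fun d p => d.modify p.1 [] (· ++ [p.2]))
      (PySem.Dict.empty : PySem.Dict String (List String))).keys).Nodup := by
    have := PySem.Dict.nodup_keys_foldl_modify_key (l := P) (key := Prod.fst)
      (d0 := ([] : List String)) (f := fun _ p => (· ++ [p.2]))
      (d := (PySem.Dict.empty : PySem.Dict String (List String)))
      (by simp)
    simpa using this
  rw [PySem.Dict.items_eq_map_keys _ hnd ([] : List String)]
  have hkeys : ((P.foldl (fun d p => d.modify p.1 [] (· ++ [p.2]))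
      (PySem.Dict.empty : PySem.Dict String (List String))).keys)
      = PySem.List.dedup (P.map (·.1)) := by
    have := PySem.Dict.keys_foldl_modify_key (l := P) (key := Prod.fst)
      (d0 := ([] : List String)) (f := fun _ p => (· ++ [p.2]))
      (d := (PySem.Dict.empty : PySem.Dict String (List String)))
    simpa [PySem.Set.update_nil_left, PySem.List.dedup_eq_ofList] using this
  rw [hkeys]
  apply List.map_congr_left
  intro k _
  have := PySem.Dict.getD_foldl_modify_append (l := P)
    (d := (PySem.Dict.empty : PySem.Dict String (List String))) (c := k)
  simp only [PySem.Dict.getD_empty] at this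
  simp [this]

-- ===== VERDICT (by name: the statement is the Claim_ definition above) =====
theorem extract_signal_pool_spec : Claim_equal_extract_signal_pool := by
  intro log _
  show extract_signal_pool log = extract_signal_pool_alt log
  unfold extract_signal_pool extract_signal_pool_alt
  simp only [pv_flatten, pv_group]
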